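-- pv_equiv track=rewrite | github.com/oocco2019/evamp-ops | backend/app/services/oc_client.py | _expand_snapshot_service_regions
-- ===== SOURCE A (Python) =====
-- from typing import Any, Dict, List, Optional
--
-- def _expand_snapshot_service_regions(regions: List[str]) -> List[str]:
--     """
--     OC stock snapshot filters by serviceRegion. Some tenants use coarse codes (UK, DE, AU)
--     but US inventory is keyed under granular regions (e.g. US-South), not plain "US".
--     Inbound list responses show serviceRegion like "US-South"; snapshot with only "US" can return no US rows.
--     """
--     out: List[str] = []
--     seen: set[str] = set()
--     for raw in regions:
--         r = (raw or "").strip()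
--         if not r:
--             continue
--         variants: List[str] = [r]
--         if r.upper() == "US":
--             variants.extend(
--                 [
--                     "US-South",
--                     "US-North",
--                     "US-West",
--                     "US-East",
--                 ]
--             )
--         for v in variants:
--             if v not in seen:
--                 seen.add(v)
--                 out.append(v)
--     return out
-- ===== SOURCE B (Python) =====
-- from typing import List
--
-- _US_GRANULAR = ["US-South", "US-North", "US-West", "US-East"]
--
-- def _expand_snapshot_service_regions(regions: List[str]) -> List[str]:
--     # Back-to-front: fold over the reversed list; each region's (duplicate-free)
--     # contribution goes in front, and any copies of it are filtered out of the
--     # suffix already built.  No seen-set / dict is needed.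
--     result: List[str] = []
--     for raw in reversed(regions):
--         r = (raw or "").strip()
--         if not r:
--             continue
--         contrib = [r] + _US_GRANULAR if r.upper() == "US" else [r]
--         result = contrib + [x for x in result if x not in contrib]
--     return result
-- ===== Notes on version B (the rewrite author's own statement) =====
-- stated objective: alternative
-- what changed: Replaces A's single forward pass with an auxiliary seen-set by a back-to-front fold with no auxiliary structure at all: each region's contribution is prepended to the result built from the later regions, whose copies of those codes are filtered out.
import Mathlib
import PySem

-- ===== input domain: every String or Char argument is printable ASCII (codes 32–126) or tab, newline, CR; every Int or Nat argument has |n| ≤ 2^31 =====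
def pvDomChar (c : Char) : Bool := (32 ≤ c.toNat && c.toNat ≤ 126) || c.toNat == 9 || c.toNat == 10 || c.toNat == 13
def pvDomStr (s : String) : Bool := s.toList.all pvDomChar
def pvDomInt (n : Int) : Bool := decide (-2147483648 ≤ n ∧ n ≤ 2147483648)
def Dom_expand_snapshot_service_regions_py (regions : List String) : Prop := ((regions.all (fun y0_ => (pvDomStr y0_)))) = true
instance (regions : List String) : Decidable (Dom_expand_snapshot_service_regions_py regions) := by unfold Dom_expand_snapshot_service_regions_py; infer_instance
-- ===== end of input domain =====

-- B traverses the regions back-to-front with no seen-set: each region's contribution is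
-- prepended and filtered out of the suffix already built; objective: alternative, same result.


-- ===== PORT A =====
-- state: (out, seen); 'raw or ""' on a str is raw itself when nonempty, "" when empty —
-- strip gives the same r either way, so it is ported as strip directly.
def expand_snapshot_service_regions_py (regions : List String) : List String :=
  (regions.foldl
    (fun (st : List String × PySem.Set String) raw =>
      let r := PySem.Str.strip raw
      if r = "" then st
      else
        let variants : List String :=
          if PySem.Str.upper r = "US" then
            [r, "US-South", "US-North", "US-West", "US-East"]
          else [r]
        variants.foldl
          (fun (st : List String × PySem.Set String) v =>
            if st.2.contains v then st
            else (st.1 ++ [v], PySem.Set.add st.2 v))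
          st)
    ([], PySem.Set.empty)).1

-- ===== PORT B =====
def pvUsGranular : List String := ["US-South", "US-North", "US-West", "US-East"]

-- B: fold over reversed(regions); a region's contribution goes in front and its
-- copies are filtered out of the suffix already built
def expand_snapshot_service_regions_py_alt (regions : List String) : List String :=
  regions.reverse.foldl
    (fun (result : List String) raw =>
      let r := PySem.Str.strip raw
      if r = "" then result
      else
        let contrib := if PySem.Str.upper r = "US" then [r] ++ pvUsGranular else [r]
        contrib ++ result.filter (fun x => !(contrib.contains x)))
    []

-- ===== PRECONDITION & SPEC =====
def Spec_expand_snapshot_service_regions_py (regions : List String) (out : List String) : Prop := out = expand_snapshot_service_regions_py_alt regions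
instance (regions : List String) (out : List String) : Decidable (Spec_expand_snapshot_service_regions_py regions out) := by unfold Spec_expand_snapshot_service_regions_py; infer_instance

-- ===== CLAIM (what is proved, stated in full; the proofs are below) =====
def Claim_equal_expand_snapshot_service_regions_py : Prop := ∀ (regions : List String), Dom_expand_snapshot_service_regions_py regions → Spec_expand_snapshot_service_regions_py regions (expand_snapshot_service_regions_py regions)

-- ===== LEMMAS AND PROOFS =====

-- the flat list of codes one raw region contributes (shared shape of both loops)
def pvPerRegion (raw : String) : List String :=
  if PySem.Str.strip raw = "" then []
  else if PySem.Str.upper (PySem.Str.strip raw) = "US" then [PySem.Str.strip raw] ++ pvUsGranular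
  else [PySem.Str.strip raw]

-- A's dedup step
def pvStep (st : List String × PySem.Set String) (v : String) : List String × PySem.Set String :=
  if st.2.contains v then st else (st.1 ++ [v], PySem.Set.add st.2 v)

-- A's fold is the pvStep-fold over the flattened contributions
lemma pvA_flat (regions : List String) (st : List String × PySem.Set String) :
    regions.foldl
      (fun (st : List String × PySem.Set String) raw =>
        let r := PySem.Str.strip raw
        if r = "" then st
        else
          let variants : List String :=
            if PySem.Str.upper r = "US" then
              [r, "US-South", "US-North", "US-West", "US-East"]
            else [r]
          variants.foldl
            (fun (st : List String × PySem.Set String) v =>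
              if st.2.contains v then st
              else (st.1 ++ [v], PySem.Set.add st.2 v))
            st)
      st
    = (regions.flatMap pvPerRegion).foldl pvStep st := by
  induction regions generalizing st with
  | nil => rfl
  | cons raw rest ih =>
      simp only [List.foldl_cons, List.flatMap_cons, List.foldl_append]
      rw [ih]
      congr 1
      simp only [pvPerRegion, pvUsGranular]
      split_ifs <;> rfl

-- the interleaved dedup fold, started with out = seen, computes the Set.add fold
lemma pvStep_fold (E : List String) (st : List String × PySem.Set String)
    (h : st.1 = st.2) :
    (E.foldl pvStep st).1 = E.foldl PySem.Set.add st.1 ∧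
    (E.foldl pvStep st).2 = E.foldl PySem.Set.add st.2 := by
  induction E generalizing st with
  | nil => exact ⟨h ▸ rfl, rfl⟩
  | cons v rest ih =>
      simp only [List.foldl_cons]
      have hadd1 : PySem.Set.add st.1 v = (pvStep st v).1 := by
        simp [pvStep, PySem.Set.add, h]; split_ifs <;> simp [h]
      have hadd2 : PySem.Set.add st.2 v = (pvStep st v).2 := by
        simp [pvStep, PySem.Set.add]; split_ifs <;> rfl
      have hinv : (pvStep st v).1 = (pvStep st v).2 := by
        simp [pvStep]; split_ifs with hc
        · exact h
        · simp [PySem.Set.add, hc, h]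
      rw [hadd1, hadd2]
      exact ih _ hinv

-- a fold of Set.add over fresh, pairwise-distinct elements just appends them
lemma pvFoldl_add_of_nodup (c : List String) : ∀ (acc : List String), (acc ++ c).Nodup →
    c.foldl PySem.Set.add acc = acc ++ c := by
  induction c with
  | nil => intro acc _; simp
  | cons v t ih =>
      intro acc h
      have hv : v ∉ acc := fun hm =>
        ((List.nodup_append.mp h).2.2 v hm v (by simp)) rfl
      have hadd : PySem.Set.add acc v = acc ++ [v] := by
        simp [PySem.Set.add, PySem.Set.contains, hv]
      have h2 : ((acc ++ [v]) ++ t).Nodup := by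
        rw [List.append_assoc]; simpa using h
      rw [List.foldl_cons, hadd, ih (acc ++ [v]) h2]
      simp

-- the key dedup law: folding Set.add from a duplicate-free accumulator c
lemma pvFoldl_add_eq (t : List String) : ∀ (c : List String), c.Nodup →
    t.foldl PySem.Set.add c = c ++ (PySem.List.dedup t).filter (fun x => !(c.contains x)) := by
  induction t with
  | nil =>
      intro c _
      rw [show PySem.List.dedup ([] : List String) = [] from rfl]
      simp
  | cons v t ih =>
      intro c h
      have hstep : PySem.List.dedup (v :: t) = t.foldl PySem.Set.add [v] := by
        rw [PySem.List.dedup_eq_ofList, PySem.Set.ofList_eq_foldl]; rfl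
      have hdedup : PySem.List.dedup (v :: t)
          = [v] ++ (PySem.List.dedup t).filter (fun x => !([v].contains x)) := by
        rw [hstep, ih [v] (List.nodup_singleton v)]
      by_cases hv : v ∈ c
      · have hadd : PySem.Set.add c v = c := by
          simp [PySem.Set.add, PySem.Set.contains, hv]
        rw [List.foldl_cons, hadd, ih c h, hdedup,
            List.filter_append, List.filter_filter]
        have h1 : List.filter (fun x => !(c.contains x)) [v] = [] := by
          simp [hv]
        rw [h1, List.nil_append]
        congr 1
        apply List.filter_congr
        intro x _
        by_cases hxc : x ∈ c
        · simp [hxc]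
        · by_cases hxv : x = v
          · exact absurd (hxv ▸ hv) hxc
          · simp [hxc, hxv]
      · have hadd : PySem.Set.add c v = c ++ [v] := by
          simp [PySem.Set.add, PySem.Set.contains, hv]
        have hnodup : (c ++ [v]).Nodup := by
          rw [List.nodup_append]
          exact ⟨h, List.nodup_singleton v,
            by intro a ha b hb heq; simp at hb; rw [hb] at heq; exact hv (heq ▸ ha)⟩
        rw [List.foldl_cons, hadd, ih (c ++ [v]) hnodup, hdedup,
            List.filter_append, List.filter_filter]
        have h1 : List.filter (fun x => !(c.contains x)) [v] = [v] := by
          simp [hv]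
        rw [h1, List.append_assoc]
        congr 2
        apply List.filter_congr
        intro x _
        by_cases hxc : x ∈ c
        · simp [hxc]
        · by_cases hxv : x = v <;> simp [hxc, hxv]

-- dedup distributes over prepending a duplicate-free block
lemma pvDedup_append (c t : List String) (h : c.Nodup) :
    PySem.List.dedup (c ++ t) = c ++ (PySem.List.dedup t).filter (fun x => !(c.contains x)) := by
  rw [PySem.List.dedup_eq_ofList, PySem.Set.ofList_eq_foldl, List.foldl_append,
      pvFoldl_add_of_nodup c [] (by simpa using h), List.nil_append,
      pvFoldl_add_eq t c h]

-- each region's contribution is duplicate-free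
lemma pvPerRegion_nodup (raw : String) : (pvPerRegion raw).Nodup := by
  unfold pvPerRegion
  split_ifs with h1 h2
  · exact List.nodup_nil
  · have hr : PySem.Str.strip raw ∉ pvUsGranular := by
      intro hm
      simp [pvUsGranular] at hm
      rcases hm with h | h | h | h <;> rw [h] at h2 <;> exact absurd h2 (by decide)
    rw [List.nodup_append]
    exact ⟨List.nodup_singleton _, by decide,
      by intro a ha b hb heq; simp at ha; subst ha; subst heq; exact hr hb⟩
  · exact List.nodup_singleton _

-- B computes dedup of the flattened contributions
lemma pvB_eq_dedup (regions : List String) :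
    expand_snapshot_service_regions_py_alt regions
      = PySem.List.dedup (regions.flatMap pvPerRegion) := by
  unfold expand_snapshot_service_regions_py_alt
  rw [List.foldl_reverse]
  induction regions with
  | nil => rfl
  | cons raw rest ih =>
      rw [List.foldr_cons, ih, List.flatMap_cons]
      dsimp only
      by_cases h1 : PySem.Str.strip raw = ""
      · rw [if_pos h1, show pvPerRegion raw = [] by simp [pvPerRegion, h1]]
        rfl
      · have hpr : pvPerRegion raw
            = (if PySem.Str.upper (PySem.Str.strip raw) = "US"
               then [PySem.Str.strip raw] ++ pvUsGranular
               else [PySem.Str.strip raw]) := by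
          simp [pvPerRegion, h1]
        rw [if_neg h1, pvDedup_append _ _ (pvPerRegion_nodup raw), ← hpr]

-- ===== VERDICT (by name: the statement is the Claim_ definition above) =====
theorem expand_snapshot_service_regions_py_spec : Claim_equal_expand_snapshot_service_regions_py := by
  intro regions _
  unfold Spec_expand_snapshot_service_regions_py
  rw [pvB_eq_dedup]
  unfold expand_snapshot_service_regions_py
  rw [pvA_flat,
      (pvStep_fold (regions.flatMap pvPerRegion) ([], PySem.Set.empty) rfl).1,
      PySem.List.dedup_eq_ofList, PySem.Set.ofList_eq_foldl]
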